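-- pv_equiv track=rewrite | github.com/rds504/AoC-2020 | solutions/day24.py | initialise_floor
-- ===== SOURCE A (Python) =====
-- DIRECTION_VECTORS = {
--     "e"  : ( 1,  0),
--     "ne" : ( 1, -1),
--     "se" : ( 0,  1),
--     "nw" : ( 0, -1),
--     "sw" : (-1,  1),
--     "w"  : (-1,  0)
-- }
--
-- def flip_tile(flipped_set, tile):
--     if tile in flipped_set:
--         flipped_set.remove(tile)
--     else:
--         flipped_set.add(tile)
--
-- def initialise_floor(instructions):
--
--     flipped_tiles = set()
--
--     for line in instructions:
--
--         x, y = 0, 0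
--         sn_qual = ''
--
--         for char in line:
--
--             if char in "sn":
--                 sn_qual = char
--                 continue
--
--             if char not in "ew":
--                 raise ValueError("Invalid direction '{char}'")
--
--             dx, dy = DIRECTION_VECTORS[sn_qual + char]
--             x, y = x + dx, y + dy
--             sn_qual = ''
--
--         flip_tile(flipped_tiles, (x, y))
--
--     return flipped_tiles
-- ===== SOURCE B (Python) =====
-- def initialise_floor(instructions):
--
--     counts = {}
--
--     for line in instructions:
--
--         for char in line:
--             if char not in "snew":
--                 raise ValueError("Invalid direction '{char}'")
--
--         # Each 'e'/'w' pairs with an immediately preceding 's'/'n' (if any) to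
--         # form one hex step; steps commute, so the destination is a closed form
--         # of the six token counts, obtained by substring counting.
--         se = line.count("se")
--         ne = line.count("ne")
--         sw = line.count("sw")
--         nw = line.count("nw")
--         e = line.count("e") - se - ne
--         w = line.count("w") - sw - nw
--         tile = (e + ne - sw - w, se + sw - ne - nw)
--
--         counts[tile] = counts.pop(tile, 0) + 1
--
--     return {tile for tile, count in counts.items() if count % 2 == 1}
-- ===== Notes on version B (the rewrite author's own statement) =====
-- stated objective: alternative
-- what changed: Replaces A's sequential per-character coordinate walk (pending-qualifier state machine with a direction-vector dict, toggling a set per line) with a closed-form parse: validate the line, count the six tokens with substring counting (line.count('se') etc.), compute the destination arithmetically from the counts, then count destinations in a dict and keep odd-parity tiles in a second pass.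
import Mathlib
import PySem

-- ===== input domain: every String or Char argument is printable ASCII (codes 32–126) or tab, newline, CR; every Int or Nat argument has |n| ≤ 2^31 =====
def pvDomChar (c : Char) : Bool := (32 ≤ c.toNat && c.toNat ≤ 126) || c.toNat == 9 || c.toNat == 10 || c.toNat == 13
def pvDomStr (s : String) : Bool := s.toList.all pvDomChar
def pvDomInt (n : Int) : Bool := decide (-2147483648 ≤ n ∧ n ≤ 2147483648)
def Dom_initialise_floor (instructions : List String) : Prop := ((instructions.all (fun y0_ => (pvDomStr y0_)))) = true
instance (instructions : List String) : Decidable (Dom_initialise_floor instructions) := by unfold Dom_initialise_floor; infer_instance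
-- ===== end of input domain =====

-- B replaces A's sequential per-character coordinate walk (pending-qualifier state machine with a
-- direction-vector dict, toggling a set per line) with a closed-form parse — validate the line,
-- count the six direction tokens by substring counting (line.count("se") etc.), compute the
-- destination arithmetically from those counts — then counts the destinations in a dict and keeps
-- the odd-parity tiles in a second pass ("alternative"; same asymptotic cost).

-- ===== PORT A =====
def DIRECTION_VECTORS : PySem.Dict String (Int × Int) :=
  PySem.Dict.mk [("e", (1, 0)), ("ne", (1, -1)), ("se", (0, 1)),
                 ("nw", (0, -1)), ("sw", (-1, 1)), ("w", (-1, 0))]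

def flip_tile (flipped_set : PySem.Set (Int × Int)) (tile : Int × Int) : PySem.Set (Int × Int) :=
  if PySem.Set.contains flipped_set tile then (PySem.Set.remove? flipped_set tile).getD flipped_set
  else PySem.Set.add flipped_set tile

-- inner character loop of A; none = the ValueError raise
def pvStepA (st : Option (Int × Int × String)) (c : Char) : Option (Int × Int × String) :=
  match st with
  | none => none
  | some (x, y, sn_qual) =>
    if c = 's' ∨ c = 'n' then some (x, y, String.mk [c])
    else if ¬ (c = 'e' ∨ c = 'w') then none    -- raise ValueError
    else match DIRECTION_VECTORS.get? (sn_qual ++ String.mk [c]) with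
      | some (dx, dy) => some (x + dx, y + dy, "")
      | none => none

def pvLineA (line : String) : Option (Int × Int) :=
  (line.toList.foldl pvStepA (some (0, 0, ""))).map (fun r => (r.1, r.2.1))

def initialise_floor (instructions : List String) : List (Int × Int) :=
  (instructions.foldl
    (fun acc line =>
      match acc, pvLineA line with
      | some s, some t => some (flip_tile s t)
      | _, _ => none)
    (some PySem.Set.empty)).getD PySem.Set.empty

-- ===== PORT B =====
-- one line of B: validate, then the closed form of the six substring counts; none = ValueError
def pvLineB (line : String) : Option (Int × Int) :=
  if line.toList.all (fun c => c == 's' || c == 'n' || c == 'e' || c == 'w') then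
    let se : Int := PySem.Str.count line "se"
    let ne : Int := PySem.Str.count line "ne"
    let sw : Int := PySem.Str.count line "sw"
    let nw : Int := PySem.Str.count line "nw"
    let e : Int := (PySem.Str.count line "e" : Int) - se - ne
    let w : Int := (PySem.Str.count line "w" : Int) - sw - nw
    some (e + ne - sw - w, se + sw - ne - nw)
  else none

-- counts[tile] = counts.pop(tile, 0) + 1
def pvCount (counts : PySem.Dict (Int × Int) Int) (tile : Int × Int) :
    PySem.Dict (Int × Int) Int :=
  match PySem.Dict.pop? counts tile with
  | some (c, d) => d.insert tile (c + 1)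
  | none => counts.insert tile 1

def initialise_floor_alt (instructions : List String) : List (Int × Int) :=
  match instructions.foldl
    (fun acc line => acc.bind (fun d => (pvLineB line).map (fun t => pvCount d t)))
    (some PySem.Dict.empty) with
  | some counts =>
      PySem.Set.ofList ((counts.items.filter (fun p => PySem.Int.mod p.2 2 == 1)).map Prod.fst)
  | none => []

-- ===== PRECONDITION & SPEC =====
-- Pre_ excludes exactly the inputs on which A raises ValueError: a line containing a character
-- other than 's', 'n', 'e', 'w' (B raises the same ValueError there).
def Pre_initialise_floor (instructions : List String) : Prop :=
  (instructions.all
    (fun line => line.toList.all (fun c => c = 's' || c = 'n' || c = 'e' || c = 'w'))) = true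
instance (instructions : List String) : Decidable (Pre_initialise_floor instructions) := by
  unfold Pre_initialise_floor; infer_instance

def pvWitness_initialise_floor : List String := ["esenee", "ew", "nwwswee", ""]

def Spec_initialise_floor (instructions : List String) (out : List (Int × Int)) : Prop :=
  out = initialise_floor_alt instructions
instance (instructions : List String) (out : List (Int × Int)) :
    Decidable (Spec_initialise_floor instructions out) := by
  unfold Spec_initialise_floor; infer_instance

-- ===== CLAIM (what is proved, stated in full; the proofs are below) =====
def Claim_equal_initialise_floor : Prop :=
  ∀ (instructions : List String), Dom_initialise_floor instructions →
    Pre_initialise_floor instructions →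
    Spec_initialise_floor instructions (initialise_floor instructions)

-- ===== LEMMAS AND PROOFS =====

-- number of adjacent (a, b) pairs in a list of characters
def pairs2 (a b : Char) : List Char → Nat
  | [] => 0
  | [_] => 0
  | c :: d :: r => (if c = a ∧ d = b then 1 else 0) + pairs2 a b (d :: r)

lemma pairs2_cons_ne (a b c : Char) (r : List Char) (h : c ≠ a) :
    pairs2 a b (c :: r) = pairs2 a b r := by
  cases r with
  | nil => rfl
  | cons d r => simp [pairs2, h]

-- Chars.count.go on a single-character pattern counts occurrences of the character
lemma go_one (a : Char) : ∀ (fuel : Nat) (l : List Char) (acc : Nat), l.length ≤ fuel →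
    PySem.Chars.count.go [a] fuel l acc = acc + l.count a := by
  intro fuel
  induction fuel with
  | zero =>
    intro l acc h
    have : l = [] := List.eq_nil_of_length_eq_zero (Nat.le_zero.mp h)
    subst this; simp [PySem.Chars.count.go]
  | succ f ih =>
    intro l acc h
    cases l with
    | nil => simp [PySem.Chars.count.go]
    | cons c t =>
      rw [PySem.Chars.count.go.eq_def]
      simp only [List.length_cons] at h
      by_cases hc : c = a
      · subst hc
        have hpre : ([c].isPrefixOf (c :: t)) = true := by simp [List.isPrefixOf]
        simp only [hpre, if_true]
        have hdrop : List.drop ([c] : List Char).length (c :: t) = t := by simp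
        rw [hdrop, ih t (acc + 1) (by omega)]
        simp [List.count_cons]; omega
      · have hpre : ([a].isPrefixOf (c :: t)) = false := by
          simp [List.isPrefixOf, Ne.symm hc]
        simp only [hpre, if_neg Bool.false_ne_true]
        rw [ih t acc (by omega)]
        simp [List.count_cons, hc]

-- Chars.count.go on a two-character pattern with distinct characters counts adjacent pairs
lemma go_two (a b : Char) (hab : b ≠ a) :
    ∀ (fuel : Nat) (l : List Char) (acc : Nat), l.length ≤ fuel →
    PySem.Chars.count.go [a, b] fuel l acc = acc + pairs2 a b l := by
  intro fuel
  induction fuel with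
  | zero =>
    intro l acc h
    have : l = [] := List.eq_nil_of_length_eq_zero (Nat.le_zero.mp h)
    subst this; simp [PySem.Chars.count.go, pairs2]
  | succ f ih =>
    intro l acc h
    cases l with
    | nil => simp [PySem.Chars.count.go, pairs2]
    | cons c t =>
      rw [PySem.Chars.count.go.eq_def]
      cases t with
      | nil =>
        have hpre : ([a, b].isPrefixOf [c]) = false := by
          simp [List.isPrefixOf]
        simp only [hpre, if_neg Bool.false_ne_true]
        rw [ih [] acc (by simp)]
        simp [pairs2]
      | cons d r =>
        simp only [List.length_cons] at h
        by_cases hm : c = a ∧ d = b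
        · obtain ⟨rfl, rfl⟩ := hm
          have hpre : ([c, d].isPrefixOf (c :: d :: r)) = true := by
            simp [List.isPrefixOf]
          simp only [hpre, if_true]
          have hdrop : List.drop ([c, d] : List Char).length (c :: d :: r) = r := by simp
          rw [hdrop, ih r (acc + 1) (by omega)]
          rw [show pairs2 c d (c :: d :: r) = 1 + pairs2 c d (d :: r) by simp [pairs2],
              pairs2_cons_ne c d d r hab]
          omega
        · have hpre : ([a, b].isPrefixOf (c :: d :: r)) = false := by
            simp only [List.isPrefixOf, Bool.and_eq_false_iff]
            rcases Decidable.not_and_iff_not_or_not.mp hm with hc | hd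
            · left; simp [Ne.symm hc]
            · right; simp [List.isPrefixOf, Ne.symm hd]
          simp only [hpre, if_neg Bool.false_ne_true]
          rw [ih (d :: r) acc (by simp only [List.length_cons]; omega)]
          simp [pairs2, hm]

lemma count_one (cs : List Char) (a : Char) :
    PySem.Chars.count cs [a] = cs.count a := by
  rw [PySem.Chars.count]
  simp only [List.isEmpty_cons, if_neg Bool.false_ne_true]
  simpa using go_one a cs.length cs 0 le_rfl

lemma count_two (cs : List Char) (a b : Char) (hab : b ≠ a) :
    PySem.Chars.count cs [a, b] = pairs2 a b cs := by
  rw [PySem.Chars.count]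
  simp only [List.isEmpty_cons, if_neg Bool.false_ne_true]
  simpa using go_two a b hab cs.length cs 0 le_rfl

-- the zip-with-previous step machine: an intermediate between A's fold and B's closed form
def pvStepM (st : Option (Int × Int)) (pc : Char × Char) : Option (Int × Int) :=
  match st with
  | none => none
  | some (x, y) =>
    if pc.2 = 's' ∨ pc.2 = 'n' then some (x, y)
    else if ¬ (pc.2 = 'e' ∨ pc.2 = 'w') then none
    else
      let q := if pc.1 = 's' ∨ pc.1 = 'n' then pc.1 else ' '
      let y' := if q = 's' then y + 1 else if q = 'n' then y - 1 else y
      let x' := if pc.2 = 'e' then (if q ≠ 's' then x + 1 else x)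
                else (if q ≠ 'n' then x - 1 else x)
      some (x', y')

-- A's pending qualifier as a function of the previous character
def pvQmap (p : Char) : String := if p = 's' then "s" else if p = 'n' then "n" else ""

lemma foldA_none (cs : List Char) : cs.foldl pvStepA none = none := by
  induction cs with
  | nil => rfl
  | cons c cs ih => simpa [pvStepA] using ih

lemma foldM_none (ps : List (Char × Char)) : ps.foldl pvStepM none = none := by
  induction ps with
  | nil => rfl
  | cons p ps ih => simpa [pvStepM] using ih

-- A's inner loop agrees with the zip-with-previous machine, for every line
lemma lineEquiv (cs : List Char) : ∀ (p : Char) (x y : Int),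
    ((cs.foldl pvStepA (some (x, y, pvQmap p))).map (fun r => (r.1, r.2.1)))
      = (List.zip (p :: cs) cs).foldl pvStepM (some (x, y)) := by
  induction cs with
  | nil => intro p x y; rfl
  | cons c cs ih =>
    intro p x y
    rw [List.zip_cons_cons, List.foldl_cons, List.foldl_cons]
    by_cases hc : c = 's' ∨ c = 'n'
    · have hA : pvStepA (some (x, y, pvQmap p)) c = some (x, y, pvQmap c) := by
        rcases hc with rfl | rfl <;> simp [pvStepA, pvQmap] <;> rfl
      have hB : pvStepM (some (x, y)) (p, c) = some (x, y) := by
        simp [pvStepM, hc]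
      rw [hA, hB]; exact ih c x y
    · push_neg at hc
      by_cases hd : c = 'e' ∨ c = 'w'
      · by_cases hp : p = 's'
        · subst hp
          rcases hd with rfl | rfl
          · have hA : pvStepA (some (x, y, pvQmap 's')) 'e' = some (x, y + 1, pvQmap 'e') := by
              show pvStepA (some (x, y, "s")) 'e' = some (x, y + 1, "")
              have h2 : DIRECTION_VECTORS.get? ("s" ++ String.mk ['e']) = some (0, 1) := rfl
              simp [pvStepA, h2]
            have hB : pvStepM (some (x, y)) ('s', 'e') = some (x, y + 1) := rfl
            rw [hA, hB]; exact ih 'e' x (y + 1)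
          · have hA : pvStepA (some (x, y, pvQmap 's')) 'w' = some (x - 1, y + 1, pvQmap 'w') := by
              show pvStepA (some (x, y, "s")) 'w' = some (x - 1, y + 1, "")
              have h2 : DIRECTION_VECTORS.get? ("s" ++ String.mk ['w']) = some (-1, 1) := rfl
              simp [pvStepA, h2]; ring
            have hB : pvStepM (some (x, y)) ('s', 'w') = some (x - 1, y + 1) := rfl
            rw [hA, hB]; exact ih 'w' (x - 1) (y + 1)
        · by_cases hpn : p = 'n'
          · subst hpn
            rcases hd with rfl | rfl
            · have hA : pvStepA (some (x, y, pvQmap 'n')) 'e' = some (x + 1, y - 1, pvQmap 'e') := by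
                show pvStepA (some (x, y, "n")) 'e' = some (x + 1, y - 1, "")
                have h2 : DIRECTION_VECTORS.get? ("n" ++ String.mk ['e']) = some (1, -1) := rfl
                simp [pvStepA, h2]; ring
              have hB : pvStepM (some (x, y)) ('n', 'e') = some (x + 1, y - 1) := rfl
              rw [hA, hB]; exact ih 'e' (x + 1) (y - 1)
            · have hA : pvStepA (some (x, y, pvQmap 'n')) 'w' = some (x, y - 1, pvQmap 'w') := by
                show pvStepA (some (x, y, "n")) 'w' = some (x, y - 1, "")
                have h2 : DIRECTION_VECTORS.get? ("n" ++ String.mk ['w']) = some (0, -1) := rfl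
                simp [pvStepA, h2]; ring
              have hB : pvStepM (some (x, y)) ('n', 'w') = some (x, y - 1) := rfl
              rw [hA, hB]; exact ih 'w' x (y - 1)
          · have hq : pvQmap p = "" := by simp [pvQmap, hp, hpn]
            rcases hd with rfl | rfl
            · have hA : pvStepA (some (x, y, pvQmap p)) 'e' = some (x + 1, y, pvQmap 'e') := by
                rw [hq]
                show pvStepA (some (x, y, "")) 'e' = some (x + 1, y, "")
                have h2 : DIRECTION_VECTORS.get? (String.mk ['e']) = some (1, 0) := rfl
                simp [pvStepA, h2]
              have hB : pvStepM (some (x, y)) (p, 'e') = some (x + 1, y) := by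
                simp [pvStepM, hp, hpn]
              rw [hA, hB]; exact ih 'e' (x + 1) y
            · have hA : pvStepA (some (x, y, pvQmap p)) 'w' = some (x - 1, y, pvQmap 'w') := by
                rw [hq]
                show pvStepA (some (x, y, "")) 'w' = some (x - 1, y, "")
                have h2 : DIRECTION_VECTORS.get? (String.mk ['w']) = some (-1, 0) := rfl
                simp [pvStepA, h2]; ring
              have hB : pvStepM (some (x, y)) (p, 'w') = some (x - 1, y) := by
                simp [pvStepM, hp, hpn]
              rw [hA, hB]; exact ih 'w' (x - 1) y
      · have hA : pvStepA (some (x, y, pvQmap p)) c = none := by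
          simp [pvStepA, hc, hd]
        have hB : pvStepM (some (x, y)) (p, c) = none := by
          simp [pvStepM, hc, hd]
        rw [hA, hB, foldA_none, foldM_none]; rfl

-- the closed-form x and y displacements of B, as functions of the char list with previous char p
def pvFX (p : Char) (cs : List Char) : Int :=
  (cs.count 'e' : Int) - pairs2 's' 'e' (p :: cs) - (cs.count 'w' : Int) + pairs2 'n' 'w' (p :: cs)
def pvFY (p : Char) (cs : List Char) : Int :=
  (pairs2 's' 'e' (p :: cs) : Int) + pairs2 's' 'w' (p :: cs)
    - pairs2 'n' 'e' (p :: cs) - pairs2 'n' 'w' (p :: cs)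

-- the zip machine computes the closed form, on valid lines
lemma zipClosed (cs : List Char) : ∀ (p : Char) (x y : Int),
    (∀ c ∈ cs, c = 's' ∨ c = 'n' ∨ c = 'e' ∨ c = 'w') →
    (List.zip (p :: cs) cs).foldl pvStepM (some (x, y)) = some (x + pvFX p cs, y + pvFY p cs) := by
  induction cs with
  | nil => intro p x y _; simp [pvFX, pvFY, pairs2]
  | cons c r ih =>
    intro p x y hall
    have hr : ∀ c ∈ r, c = 's' ∨ c = 'n' ∨ c = 'e' ∨ c = 'w' := fun d hd => hall d (by simp [hd])
    rw [List.zip_cons_cons, List.foldl_cons]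
    have hp2 : ∀ a b : Char, pairs2 a b (p :: c :: r)
        = (if p = a ∧ c = b then 1 else 0) + pairs2 a b (c :: r) := by
      intro a b; simp [pairs2]
    rcases hall c (by simp) with rfl | rfl | rfl | rfl
    · -- c = 's'
      have hstep : pvStepM (some (x, y)) (p, 's') = some (x, y) := by simp [pvStepM]
      rw [hstep, ih 's' x y hr]
      simp [pvFX, pvFY, hp2]
    · -- c = 'n'
      have hstep : pvStepM (some (x, y)) (p, 'n') = some (x, y) := by simp [pvStepM]
      rw [hstep, ih 'n' x y hr]
      simp [pvFX, pvFY, hp2]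
    · -- c = 'e'
      have hstep : pvStepM (some (x, y)) (p, 'e')
          = some ((if p = 's' then x else x + 1),
                  (if p = 's' then y + 1 else if p = 'n' then y - 1 else y)) := by
        by_cases hp : p = 's'
        · subst hp; simp [pvStepM]
        · by_cases hpn : p = 'n'
          · subst hpn; simp [pvStepM]
          · simp [pvStepM, hp, hpn]
      rw [hstep, ih 'e' _ _ hr]
      simp only [pvFX, pvFY, hp2, List.count_cons, Option.some.injEq, Prod.mk.injEq]
      by_cases hp : p = 's'
      · subst hp; constructor <;> simp <;> (first | (push_cast; ring) | ring)
      · by_cases hpn : p = 'n'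
        · subst hpn; constructor <;> simp <;> (first | (push_cast; ring) | ring)
        · constructor <;> simp [hp, hpn] <;> (first | (push_cast; ring) | ring)
    · -- c = 'w'
      have hstep : pvStepM (some (x, y)) (p, 'w')
          = some ((if p = 'n' then x else x - 1),
                  (if p = 's' then y + 1 else if p = 'n' then y - 1 else y)) := by
        by_cases hp : p = 's'
        · subst hp; simp [pvStepM]
        · by_cases hpn : p = 'n'
          · subst hpn; simp [pvStepM]
          · simp [pvStepM, hp, hpn]
      rw [hstep, ih 'w' _ _ hr]
      simp only [pvFX, pvFY, hp2, List.count_cons, Option.some.injEq, Prod.mk.injEq]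
      by_cases hp : p = 's'
      · subst hp; constructor <;> simp <;> (first | (push_cast; ring) | ring)
      · by_cases hpn : p = 'n'
        · subst hpn; constructor <;> simp <;> (first | (push_cast; ring) | ring)
        · constructor <;> simp [hp, hpn] <;> (first | (push_cast; ring) | ring)

-- the zip machine raises exactly on invalid lines
lemma zipNone (cs : List Char) : ∀ (p : Char) (x y : Int),
    ¬ (∀ c ∈ cs, c = 's' ∨ c = 'n' ∨ c = 'e' ∨ c = 'w') →
    (List.zip (p :: cs) cs).foldl pvStepM (some (x, y)) = none := by
  induction cs with
  | nil => intro p x y h; exact absurd (by simp) h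
  | cons c r ih =>
    intro p x y h
    rw [List.zip_cons_cons, List.foldl_cons]
    by_cases hc : c = 's' ∨ c = 'n' ∨ c = 'e' ∨ c = 'w'
    · have hr : ¬ (∀ d ∈ r, d = 's' ∨ d = 'n' ∨ d = 'e' ∨ d = 'w') := by
        intro hr'
        apply h
        intro d hd
        rcases List.mem_cons.mp hd with rfl | hd'
        · exact hc
        · exact hr' d hd'
      cases hst : pvStepM (some (x, y)) (p, c) with
      | none => rw [foldM_none]
      | some st => obtain ⟨x', y'⟩ := st; rw [ih c x' y' hr]
    · have hstep : pvStepM (some (x, y)) (p, c) = none := by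
        push_neg at hc
        simp [pvStepM, hc.1, hc.2.1, hc.2.2.1, hc.2.2.2]
      rw [hstep, foldM_none]
  
-- the two line parsers agree
lemma pvLine_eq (line : String) : pvLineA line = pvLineB line := by
  have hA : pvLineA line = (List.zip (' ' :: line.toList) line.toList).foldl pvStepM (some (0, 0)) := by
    have h := lineEquiv line.toList ' ' 0 0
    simpa [pvLineA, pvQmap] using h
  rw [hA]
  by_cases hall : ∀ c ∈ line.toList, c = 's' ∨ c = 'n' ∨ c = 'e' ∨ c = 'w'
  · rw [zipClosed line.toList ' ' 0 0 hall]
    have hb : (line.toList.all (fun c => c == 's' || c == 'n' || c == 'e' || c == 'w')) = true := by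
      rw [List.all_eq_true]
      intro c hc
      rcases hall c hc with rfl | rfl | rfl | rfl <;> simp
    have hcs : ∀ a b : Char, a ≠ ' ' → pairs2 a b (' ' :: line.toList) = pairs2 a b line.toList :=
      fun a b ha => pairs2_cons_ne a b ' ' line.toList (Ne.symm ha)
    have hse : PySem.Str.count line "se" = pairs2 's' 'e' line.toList := by
      rw [PySem.Str.count_eq, show ("se" : String).toList = ['s', 'e'] from rfl,
          count_two _ _ _ (by decide)]
    have hne : PySem.Str.count line "ne" = pairs2 'n' 'e' line.toList := by
      rw [PySem.Str.count_eq, show ("ne" : String).toList = ['n', 'e'] from rfl,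
          count_two _ _ _ (by decide)]
    have hsw : PySem.Str.count line "sw" = pairs2 's' 'w' line.toList := by
      rw [PySem.Str.count_eq, show ("sw" : String).toList = ['s', 'w'] from rfl,
          count_two _ _ _ (by decide)]
    have hnw : PySem.Str.count line "nw" = pairs2 'n' 'w' line.toList := by
      rw [PySem.Str.count_eq, show ("nw" : String).toList = ['n', 'w'] from rfl,
          count_two _ _ _ (by decide)]
    have he : PySem.Str.count line "e" = line.toList.count 'e' := by
      rw [PySem.Str.count_eq, show ("e" : String).toList = ['e'] from rfl, count_one]
    have hw : PySem.Str.count line "w" = line.toList.count 'w' := by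
      rw [PySem.Str.count_eq, show ("w" : String).toList = ['w'] from rfl, count_one]
    rw [pvLineB, if_pos hb]
    simp only [hse, hne, hsw, hnw, he, hw, pvFX, pvFY,
      hcs 's' 'e' (by decide), hcs 'n' 'e' (by decide),
      hcs 's' 'w' (by decide), hcs 'n' 'w' (by decide),
      Option.some.injEq, Prod.mk.injEq]
    constructor <;> (first | (push_cast; ring) | ring)
  · rw [zipNone line.toList ' ' 0 0 hall]
    rw [pvLineB, if_neg]
    intro hb
    apply hall
    intro c hc
    have h1 := List.all_eq_true.mp hb c hc
    simp only [Bool.or_eq_true, beq_iff_eq] at h1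
    tauto

-- odd-parity keys of a counts association list
def pvOddKeys (its : List ((Int × Int) × Int)) : List (Int × Int) :=
  (its.filter (fun p => PySem.Int.mod p.2 2 == 1)).map Prod.fst

lemma fmod_two (c : Int) : PySem.Int.mod c 2 = c % 2 := by
  simp [PySem.Int.mod, Int.fmod_eq_emod]

-- the counting step mirrors the set-toggle step
lemma mem_oddKeys (d : PySem.Dict (Int × Int) Int) (hnd : d.keys.Nodup) (t : Int × Int) (c : Int)
    (hc : d.get? t = some c) : t ∈ pvOddKeys d.items ↔ c % 2 = 1 := by
  constructor
  · intro h
    simp only [pvOddKeys, List.mem_map, List.mem_filter] at h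
    obtain ⟨⟨a, v⟩, ⟨hpmem, hpodd⟩, hpfst⟩ := h
    simp only at hpfst
    subst hpfst
    have hv : d.get? a = some v := PySem.Dict.get?_of_mem_items d hpmem hnd
    rw [hc] at hv
    injection hv with hv
    rw [fmod_two] at hpodd
    simp only [beq_iff_eq] at hpodd
    omega
  · intro h
    have hmem : (t, c) ∈ d.items := PySem.Dict.mem_items_of_get?_eq_some d hc
    simp only [pvOddKeys, List.mem_map, List.mem_filter]
    exact ⟨(t, c), ⟨hmem, by simp [fmod_two]; omega⟩, rfl⟩

lemma oddKeys_sub_keys (its : List ((Int × Int) × Int)) (t : Int × Int)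
    (h : t ∈ pvOddKeys its) : t ∈ its.map Prod.fst := by
  simp only [pvOddKeys, List.mem_map, List.mem_filter] at h ⊢
  obtain ⟨p, ⟨hp, _⟩, hfst⟩ := h
  exact ⟨p, hp, hfst⟩

lemma count_flip (d : PySem.Dict (Int × Int) Int) (t : Int × Int) (hnd : d.keys.Nodup) :
    (pvCount d t).keys.Nodup ∧ pvOddKeys (pvCount d t).items = flip_tile (pvOddKeys d.items) t := by
  by_cases hct : d.contains t = true
  · obtain ⟨c, hc⟩ : ∃ c, d.get? t = some c := by
      rcases h : d.get? t with _ | c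
      · rw [PySem.Dict.contains_eq_isSome_get?, h] at hct; simp at hct
      · exact ⟨c, rfl⟩
    have hpop : PySem.Dict.pop? d t = some (c, d.erase t) := by
      simp [PySem.Dict.pop?, hc]
    have hnc : (d.erase t).contains t = false := by
      simp only [PySem.Dict.contains, PySem.Dict.erase, List.any_eq_true, List.mem_filter]
      simp
    have hcount : (pvCount d t).items
        = d.items.filter (fun p => !(p.1 == t)) ++ [(t, c + 1)] := by
      simp only [pvCount, hpop]
      rw [PySem.Dict.items_insert_of_not_contains _ _ hnc]
      rfl
    have hkeys_nodup : (pvCount d t).keys.Nodup := by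
      simp only [PySem.Dict.keys, hcount, List.map_append]
      apply List.Nodup.append
      · exact ((d.items.filter_sublist).map Prod.fst).nodup hnd
      · simp
      · intro a ha hb
        simp at hb; subst hb
        simp only [List.mem_map, List.mem_filter] at ha
        obtain ⟨p, ⟨_, hne⟩, hfst⟩ := ha
        simp [hfst] at hne
    refine ⟨hkeys_nodup, ?_⟩
    have htmem : t ∈ pvOddKeys d.items ↔ c % 2 = 1 := mem_oddKeys d hnd t c hc
    by_cases hodd : c % 2 = 1
    · have hin : t ∈ pvOddKeys d.items := htmem.mpr hodd
      have hflip : flip_tile (pvOddKeys d.items) t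
          = (pvOddKeys d.items).filter (fun y => !(y == t)) := by
        simp [flip_tile, PySem.Set.contains, PySem.Set.remove?, PySem.Set.discard,
          List.contains_iff_mem, hin]
      have heven : ((fun p : (Int × Int) × Int => PySem.Int.mod p.2 2 == 1) (t, c + 1)) = false := by
        simp only [fmod_two, beq_iff_eq]
        simp; omega
      rw [hflip, hcount]
      simp only [pvOddKeys, List.filter_append, List.map_append, List.filter_map]
      rw [List.filter_comm]
      simp only [List.filter_cons, heven]
      simp [Function.comp_def]
    · have hnin : t ∉ pvOddKeys d.items := fun h => hodd (htmem.mp h)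
      have hflip : flip_tile (pvOddKeys d.items) t = pvOddKeys d.items ++ [t] := by
        simp [flip_tile, PySem.Set.contains, PySem.Set.add, List.contains_iff_mem, hnin]
      have hoddnew : ((fun p : (Int × Int) × Int => PySem.Int.mod p.2 2 == 1) (t, c + 1)) = true := by
        simp only [fmod_two, beq_iff_eq]
        omega
      have hfe : List.filter (fun p => PySem.Int.mod p.2 2 == 1)
            (List.filter (fun p => !(p.1 == t)) d.items)
          = List.filter (fun p => PySem.Int.mod p.2 2 == 1) d.items := by
        rw [List.filter_comm]
        apply List.filter_eq_self.mpr
        intro p hp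
        rcases List.mem_filter.mp hp with ⟨hpmem, hpodd⟩
        obtain ⟨a, v⟩ := p
        have hv : d.get? a = some v := PySem.Dict.get?_of_mem_items d hpmem hnd
        simp only [Bool.not_eq_eq_eq_not, Bool.not_true, beq_eq_false_iff_ne, ne_eq]
        intro haeq
        subst haeq
        rw [hc] at hv
        injection hv with hv
        rw [fmod_two] at hpodd
        simp only [beq_iff_eq] at hpodd
        omega
      rw [hflip, hcount]
      simp only [pvOddKeys, List.filter_append, List.filter_cons, hoddnew]
      rw [hfe]
      simp
  · have hget : d.get? t = none := by
      rcases h : d.get? t with _ | c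
      · rfl
      · rw [PySem.Dict.contains_eq_isSome_get?, h] at hct; simp at hct
    have hpop : PySem.Dict.pop? d t = none := by simp [PySem.Dict.pop?, hget]
    have hcount : (pvCount d t).items = d.items ++ [(t, 1)] := by
      simp only [pvCount, hpop]
      rw [PySem.Dict.items_insert_of_not_contains _ _ (by simpa using hct)]
    have hntk : t ∉ d.items.map Prod.fst := by
      intro h
      apply hct
      simp only [PySem.Dict.contains, List.any_eq_true]
      obtain ⟨p, hp, hfst⟩ := List.mem_map.mp h
      exact ⟨p, hp, by simp [hfst]⟩
    have hkeys_nodup : (pvCount d t).keys.Nodup := by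
      simp only [PySem.Dict.keys, hcount, List.map_append]
      apply List.Nodup.append hnd (by simp)
      intro a ha hb
      simp at hb; subst hb
      exact hntk ha
    refine ⟨hkeys_nodup, ?_⟩
    have hnin : t ∉ pvOddKeys d.items := fun h => hntk (oddKeys_sub_keys _ _ h)
    have hflip : flip_tile (pvOddKeys d.items) t = pvOddKeys d.items ++ [t] := by
      simp [flip_tile, PySem.Set.contains, PySem.Set.add, List.contains_iff_mem, hnin]
    have hodd1 : ((fun p : (Int × Int) × Int => PySem.Int.mod p.2 2 == 1) (t, (1 : Int))) = true := by
      simp [fmod_two]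
    rw [hflip, hcount]
    simp only [pvOddKeys, List.filter_append, List.filter_cons, hodd1]
    simp

lemma outerA_none (ls : List String) :
    ls.foldl (fun acc line =>
      match acc, pvLineA line with
      | some s, some t => some (flip_tile s t)
      | _, _ => none) none = none := by
  induction ls with
  | nil => rfl
  | cons l ls ih =>
    simp only [List.foldl_cons]
    exact ih

lemma outerB_none (ls : List String) :
    ls.foldl (fun acc line => acc.bind (fun d => (pvLineB line).map (fun t => pvCount d t)))
      none = none := by
  induction ls with
  | nil => rfl
  | cons l ls ih =>
    simp only [List.foldl_cons, Option.bind_none]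
    exact ih

lemma outerEquiv : ∀ (ls : List String) (s : PySem.Set (Int × Int))
    (d : PySem.Dict (Int × Int) Int), d.keys.Nodup → s = pvOddKeys d.items →
    (ls.foldl (fun acc line =>
        match acc, pvLineA line with
        | some s, some t => some (flip_tile s t)
        | _, _ => none) (some s) = none ∧
     ls.foldl (fun acc line => acc.bind (fun d => (pvLineB line).map (fun t => pvCount d t)))
        (some d) = none) ∨
    (∃ s' d',
      ls.foldl (fun acc line =>
        match acc, pvLineA line with
        | some s, some t => some (flip_tile s t)
        | _, _ => none) (some s) = some s' ∧
      ls.foldl (fun acc line => acc.bind (fun d => (pvLineB line).map (fun t => pvCount d t)))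
        (some d) = some d' ∧
      d'.keys.Nodup ∧ s' = pvOddKeys d'.items) := by
  intro ls
  induction ls with
  | nil => intro s d hnd hs; exact Or.inr ⟨s, d, rfl, rfl, hnd, hs⟩
  | cons l ls ih =>
    intro s d hnd hs
    simp only [List.foldl_cons, pvLine_eq l, Option.bind_some]
    cases hl : pvLineB l with
    | none =>
      left
      constructor
      · rw [outerA_none]
      · simpa using outerB_none ls
    | some t =>
      obtain ⟨hnd', hrel⟩ := count_flip d t hnd
      exact ih (flip_tile s t) (pvCount d t) hnd' (by rw [hs, hrel])

lemma oddKeys_nodup (d : PySem.Dict (Int × Int) Int) (hnd : d.keys.Nodup) :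
    (pvOddKeys d.items).Nodup := by
  have hsub : (pvOddKeys d.items).Sublist d.keys := by
    simpa [pvOddKeys, PySem.Dict.keys] using
      ((d.items.filter_sublist (p := fun p => PySem.Int.mod p.2 2 == 1)).map Prod.fst)
  exact hsub.nodup hnd

-- ===== VERDICT (by name: the statement is the Claim_ definition above) =====
theorem initialise_floor_spec : Claim_equal_initialise_floor := by
  intro instructions _ _
  unfold Spec_initialise_floor initialise_floor initialise_floor_alt
  rcases outerEquiv instructions PySem.Set.empty PySem.Dict.empty (by simp [PySem.Dict.empty, PySem.Dict.keys]) (by rfl) with h | ⟨s', d', hA, hB, hnd, hs⟩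
  · rw [h.1, h.2]; rfl
  · rw [hA, hB]
    simp only [Option.getD_some]
    rw [hs]
    exact (PySem.Set.ofList_eq_self_of_nodup _ (oddKeys_nodup d' hnd)).symm
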